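-- pv_equiv track=rewrite | github.com/5thGenDev/AOC2023 | Day4/Day4Part1.py | countPoint
-- ===== SOURCE A (Python) =====
-- def countPoint(winningNumbers : list, ownedNumbers : list):
--     point = 0
--     matchedCount = 0
--
--     for number in winningNumbers:
--         if number in ownedNumbers:
--             matchedCount = matchedCount + 1
--             if matchedCount == 1:
--                 point = point + 1
--             elif matchedCount > 1:
--                 point = point*2
--
--     return point, matchedCount
-- ===== SOURCE B (Python) =====
-- def countPoint(winningNumbers : list, ownedNumbers : list):
--     count = sum(1 for n in winningNumbers if n in ownedNumbers)
--     point = 0 if count == 0 else 2 ** (count - 1)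
--     return point, count
-- ===== Notes on version B (the rewrite author's own statement) =====
-- stated objective: simpler
-- what changed: Replaces the stateful doubling-with-branches loop by a single membership count followed by a closed-form score 2**(count-1) (0 when count is 0).
import Mathlib
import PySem

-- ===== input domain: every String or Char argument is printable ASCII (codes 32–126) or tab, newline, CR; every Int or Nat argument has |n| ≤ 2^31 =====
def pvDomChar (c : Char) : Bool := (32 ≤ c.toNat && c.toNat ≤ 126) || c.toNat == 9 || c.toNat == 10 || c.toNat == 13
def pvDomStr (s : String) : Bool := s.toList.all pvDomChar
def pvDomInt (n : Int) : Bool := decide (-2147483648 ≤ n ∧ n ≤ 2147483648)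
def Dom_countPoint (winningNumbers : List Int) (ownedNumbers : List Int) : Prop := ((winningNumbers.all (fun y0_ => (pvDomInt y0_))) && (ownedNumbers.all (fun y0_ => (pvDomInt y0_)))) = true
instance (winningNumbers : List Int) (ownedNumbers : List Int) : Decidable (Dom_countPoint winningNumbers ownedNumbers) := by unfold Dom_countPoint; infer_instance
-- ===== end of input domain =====

-- B replaces A's stateful doubling loop by a membership count and the closed-form score 2^(count-1): simpler.

-- ===== PORT A =====
def countPoint (winningNumbers : List Int) (ownedNumbers : List Int) : Int × Int :=
  winningNumbers.foldl
    (fun (st : Int × Int) number =>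
      if ownedNumbers.contains number then
        let matchedCount := st.2 + 1
        (if matchedCount = 1 then st.1 + 1
         else if matchedCount > 1 then st.1 * 2
         else st.1, matchedCount)
      else st)
    (0, 0)

-- ===== PORT B =====
def countPoint_alt (winningNumbers : List Int) (ownedNumbers : List Int) : Int × Int :=
  let count : Int :=
    winningNumbers.foldl (fun acc n => if ownedNumbers.contains n then acc + 1 else acc) 0
  (if count = 0 then 0 else 2 ^ (count - 1).toNat, count)

-- ===== PRECONDITION & SPEC =====
def Spec_countPoint (winningNumbers : List Int) (ownedNumbers : List Int) (out : Int × Int) : Prop := out = countPoint_alt winningNumbers ownedNumbers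
instance (winningNumbers : List Int) (ownedNumbers : List Int) (out : Int × Int) : Decidable (Spec_countPoint winningNumbers ownedNumbers out) := by unfold Spec_countPoint; infer_instance

-- ===== CLAIM (what is proved, stated in full; the proofs are below) =====
def Claim_equal_countPoint : Prop := ∀ (winningNumbers : List Int) (ownedNumbers : List Int), Dom_countPoint winningNumbers ownedNumbers → Spec_countPoint winningNumbers ownedNumbers (countPoint winningNumbers ownedNumbers)

-- ===== LEMMAS AND PROOFS =====

def pvScore (c : Int) : Int := if c = 0 then 0 else 2 ^ (c - 1).toNat

theorem pvScore_succ (c : Int) (hc : 0 ≤ c) :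
    (if c + 1 = 1 then pvScore c + 1 else if c + 1 > 1 then pvScore c * 2 else pvScore c)
      = pvScore (c + 1) := by
  unfold pvScore
  rcases eq_or_lt_of_le hc with h | h
  · simp [← h]
  · have h1 : ¬ c + 1 = 1 := by omega
    have h2 : c + 1 > 1 := by omega
    have h0 : ¬ c = 0 := by omega
    have h3 : ¬ c + 1 = 0 := by omega
    simp only [h1, h2, h0, h3, if_false, if_true, add_sub_cancel_right]
    have hnat : c.toNat = (c - 1).toNat + 1 := by omega
    rw [hnat, pow_succ]

theorem pvFold_inv (wn on : List Int) (c : Int) (hc : 0 ≤ c) :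
    wn.foldl
      (fun (st : Int × Int) number =>
        if on.contains number then
          let matchedCount := st.2 + 1
          (if matchedCount = 1 then st.1 + 1
           else if matchedCount > 1 then st.1 * 2
           else st.1, matchedCount)
        else st)
      (pvScore c, c)
    = (pvScore (wn.foldl (fun acc n => if on.contains n then acc + 1 else acc) c),
       wn.foldl (fun acc n => if on.contains n then acc + 1 else acc) c) := by
  induction wn generalizing c with
  | nil => simp
  | cons x xs ih =>
    simp only [List.foldl_cons]
    by_cases hx : on.contains x
    · simp only [hx, if_true]
      have := pvScore_succ c hc
      rw [this]
      exact ih (c + 1) (by omega)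
    · simp only [hx]
      exact ih c hc

-- ===== VERDICT (by name: the statement is the Claim_ definition above) =====
theorem countPoint_spec : Claim_equal_countPoint := by
  intro wn on _
  show countPoint wn on = countPoint_alt wn on
  unfold countPoint countPoint_alt
  have h := pvFold_inv wn on 0 le_rfl
  simpa [pvScore] using h
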